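-- pv_equiv track=rewrite | github.com/mdhatmaker/Misc-python | google/geeks_for_geeks/heap/median_of_stream.py | median_of_stream
-- ===== SOURCE A (Python) =====
-- import heapq
--
-- def median_of_stream(arr):
--     rv = []
--     h = []
--     heapq.heapify(h)
--     for x in arr:
--         heapq.heappush(h, x)
--         l = len(h)
--         if l % 2 == 1:
--             median = heapq.nsmallest(int(l/2)+1, h)[-1]
--         else:
--             median = sum(heapq.nsmallest(int(l/2)+1, h)[-2:]) // 2
--         rv.append(median)
--     return rv
-- ===== SOURCE B (Python) =====
-- def median_of_stream(arr):
--     rv = []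
--     s = []  # sorted prefix, maintained incrementally
--     for x in arr:
--         # binary search for the rightmost insertion position
--         lo, hi = 0, len(s)
--         while lo < hi:
--             mid = (lo + hi) // 2
--             if x < s[mid]:
--                 hi = mid
--             else:
--                 lo = mid + 1
--         s.insert(lo, x)
--         m = len(s) // 2
--         if len(s) % 2 == 1:
--             rv.append(s[m])
--         else:
--             rv.append((s[m - 1] + s[m]) // 2)
--     return rv
-- ===== Notes on version B (the rewrite author's own statement) =====
-- stated objective: faster
-- what changed: Instead of pushing onto a heap and re-extracting the k smallest elements with heapq.nsmallest at every step, B maintains the prefix as a sorted list (hand-written binary search for the insertion point, then one insert) and reads the median(s) off by index.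
import Mathlib
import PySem

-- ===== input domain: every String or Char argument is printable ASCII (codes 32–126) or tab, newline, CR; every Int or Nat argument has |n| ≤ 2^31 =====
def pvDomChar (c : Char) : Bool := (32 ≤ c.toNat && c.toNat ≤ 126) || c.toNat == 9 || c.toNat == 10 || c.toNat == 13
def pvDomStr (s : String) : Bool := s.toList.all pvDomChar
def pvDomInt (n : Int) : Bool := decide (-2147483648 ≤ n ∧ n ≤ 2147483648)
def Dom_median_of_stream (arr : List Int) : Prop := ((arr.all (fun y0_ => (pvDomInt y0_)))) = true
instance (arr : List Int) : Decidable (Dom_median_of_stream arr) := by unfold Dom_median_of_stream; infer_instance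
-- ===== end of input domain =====

-- B replaces A's per-element heap push + heapq.nsmallest re-selection by an incrementally
-- maintained sorted list (binary search + insert) with the median read off by index: faster.

-- ===== PORT A =====
-- heapq._siftdown(heap, 0, pos) inlined into heappush, step for step (Python keeps the pushed
-- value in a variable and writes parents down the chain before placing it).
-- (fuel = the start position bounds the strictly decreasing parent chain; the loop itself is unchanged)
def pvSiftdown (fuel : Nat) (h : List Int) (x : Int) (pos : Nat) : List Int :=
  match fuel with
  | 0 => h.set pos x
  | fuel + 1 =>
    if 0 < pos then
      let parent := (pos - 1) / 2
      let pv := h.getD parent 0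
      if x < pv then pvSiftdown fuel (h.set pos pv) x parent
      else h.set pos x
    else h.set pos x

-- heapq.heappush(h, x): append then sift down from the last position
def pvHeappush (h : List Int) (x : Int) : List Int := pvSiftdown h.length (h ++ [x]) x h.length

-- heapq.nsmallest(k, h) — stdlib call, ported by its contract: the k smallest elements, ascending
def pvNsmallest (k : Nat) (h : List Int) : List Int := (PySem.List.sorted h (fun v => v) false).take k

-- int(l/2) = l / 2 here: l = len(h) is a nonnegative int (exact float division for these lengths)
def pvStepA (st : List Int × List Int) (x : Int) : List Int × List Int :=
  let h := pvHeappush st.2 x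
  let l := h.length
  let median :=
    if l % 2 = 1 then
      PySem.List.pyGetD (pvNsmallest (l / 2 + 1) h) (-1) 0
    else
      PySem.Int.floordiv ((PySem.List.slice (pvNsmallest (l / 2 + 1) h) (some (-2)) none).sum) 2
  (st.1 ++ [median], h)

def median_of_stream (arr : List Int) : List Int :=
  (arr.foldl pvStepA ([], [])).1

-- ===== PORT B =====
-- Source B's hand-written while-loop binary search for the rightmost insertion position
-- (fuel = len(s) bounds the shrinking search span hi - lo; the loop itself is unchanged)
def pvInsPos (fuel : Nat) (s : List Int) (x : Int) (lo hi : Nat) : Nat :=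
  match fuel with
  | 0 => lo
  | fuel + 1 =>
    if lo < hi then
      let mid := (lo + hi) / 2
      if x < s.getD mid 0 then pvInsPos fuel s x lo mid
      else pvInsPos fuel s x (mid + 1) hi
    else lo

def pvStepB (st : List Int × List Int) (x : Int) : List Int × List Int :=
  let s := PySem.List.insert st.2 ((pvInsPos st.2.length st.2 x 0 st.2.length : Nat) : Int) x
  let m := s.length / 2
  let med :=
    if s.length % 2 = 1 then
      PySem.List.pyGetD s ((m : Nat) : Int) 0
    else
      PySem.Int.floordiv (PySem.List.pyGetD s (((m : Nat) : Int) - 1) 0 + PySem.List.pyGetD s ((m : Nat) : Int) 0) 2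
  (st.1 ++ [med], s)

def median_of_stream_alt (arr : List Int) : List Int :=
  (arr.foldl pvStepB ([], [])).1

-- ===== PRECONDITION & SPEC =====
def Spec_median_of_stream (arr : List Int) (out : List Int) : Prop := out = median_of_stream_alt arr
instance (arr : List Int) (out : List Int) : Decidable (Spec_median_of_stream arr out) := by unfold Spec_median_of_stream; infer_instance

-- ===== CLAIM (what is proved, stated in full; the proofs are below) =====
def Claim_equal_median_of_stream : Prop := ∀ (arr : List Int), Dom_median_of_stream arr → Spec_median_of_stream arr (median_of_stream arr)

-- ===== LEMMAS AND PROOFS =====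

-- multiset bookkeeping for the sift: x :: l.set k a ~ a :: l.set k x
theorem pv_cons_set_swap (l : List Int) (k : Nat) (a x : Int) (hk : k < l.length) :
    (x :: l.set k a).Perm (a :: l.set k x) := by
  induction l generalizing k with
  | nil => simp at hk
  | cons b t ih =>
    cases k with
    | zero => simpa using List.Perm.swap a x t
    | succ k =>
      have h1 : (x :: b :: t.set k a).Perm (b :: x :: t.set k a) := List.Perm.swap b x _
      have h2 : (x :: t.set k a).Perm (a :: t.set k x) := ih k (by simpa using hk)
      have h3 : (b :: x :: t.set k a).Perm (b :: a :: t.set k x) := h2.cons b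
      have h4 : (b :: a :: t.set k x).Perm (a :: b :: t.set k x) := List.Perm.swap a b _
      simpa using (h1.trans h3).trans h4

theorem pv_set_set_perm (l : List Int) (i j : Nat) (x : Int)
    (hij : i < j) (hj : j < l.length) :
    ((l.set j (l.getD i 0)).set i x).Perm (l.set j x) := by
  induction l generalizing i j with
  | nil => simp at hj
  | cons b t ih =>
    cases i with
    | zero =>
      cases j with
      | zero => omega
      | succ j =>
        have : ((b :: t).set (j+1) ((b :: t).getD 0 0)).set 0 x = x :: t.set j b := by simp
        rw [this]
        show (x :: t.set j b).Perm (b :: t.set j x)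
        exact pv_cons_set_swap t j b x (by simpa using hj)
    | succ i =>
      cases j with
      | zero => omega
      | succ j =>
        have h := ih i j (by omega) (by simpa using hj)
        simpa using h.cons b

theorem pv_siftdown_perm (x : Int) : ∀ (fuel pos : Nat) (h : List Int), pos ≤ fuel → pos < h.length →
    (pvSiftdown fuel h x pos).Perm (h.set pos x) := by
  intro fuel
  induction fuel with
  | zero =>
    intro pos h hf hlen
    exact List.Perm.refl _
  | succ fuel ih =>
    intro pos h hf hlen
    show (if 0 < pos then
        if x < h.getD ((pos - 1) / 2) 0 then
          pvSiftdown fuel (h.set pos (h.getD ((pos - 1) / 2) 0)) x ((pos - 1) / 2)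
        else h.set pos x
      else h.set pos x).Perm (h.set pos x)
    by_cases h0 : 0 < pos
    · rw [if_pos h0]
      by_cases hlt : x < h.getD ((pos - 1) / 2) 0
      · rw [if_pos hlt]
        have hpar : (pos - 1) / 2 < pos := by omega
        have hl2 : (pos - 1) / 2 < (h.set pos (h.getD ((pos - 1) / 2) 0)).length := by
          simp only [List.length_set]; omega
        exact (ih _ _ (by omega) hl2).trans (pv_set_set_perm h ((pos - 1) / 2) pos x hpar hlen)
      · rw [if_neg hlt]
    · rw [if_neg h0]

theorem pv_heappush_perm (h : List Int) (x : Int) : (pvHeappush h x).Perm (x :: h) := by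
  unfold pvHeappush
  have h1 := pv_siftdown_perm x h.length h.length (h ++ [x]) (le_refl _) (by simp)
  have h2 : (h ++ [x]).set h.length x = h ++ [x] := by
    apply List.ext_getElem (by simp)
    intro i hi _
    by_cases hie : i = h.length
    · subst hie; simp
    · rw [List.getElem_set_ne (by omega)]
  rw [h2] at h1
  exact h1.trans (List.perm_append_singleton x h)

-- sortedness gives index monotonicity
theorem pv_sorted_mono (s : List Int) (hs : s.Pairwise (· ≤ ·)) (p q : Nat)
    (hpq : p ≤ q) (hq : q < s.length) : s[p]'(by omega) ≤ s[q] := by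
  rcases Nat.lt_or_ge p q with h | h
  · exact (List.pairwise_iff_getElem.mp hs) p q (by omega) hq h
  · have : p = q := by omega
    subst this; exact le_refl _

-- insertion-position postcondition of Source B's binary search (needs s sorted)
theorem pv_insPos_spec (s : List Int) (x : Int) (hs : s.Pairwise (· ≤ ·)) :
    ∀ (n lo hi : Nat), hi - lo ≤ n → lo ≤ hi → hi ≤ s.length →
    (∀ idx : Nat, idx < lo → (hidx : idx < s.length) → s[idx] ≤ x) →
    (∀ idx : Nat, hi ≤ idx → (hidx : idx < s.length) → x < s[idx]) →
    lo ≤ pvInsPos n s x lo hi ∧ pvInsPos n s x lo hi ≤ hi ∧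
    (∀ idx : Nat, idx < pvInsPos n s x lo hi → (hidx : idx < s.length) → s[idx] ≤ x) ∧
    (∀ idx : Nat, pvInsPos n s x lo hi ≤ idx → (hidx : idx < s.length) → x < s[idx]) := by
  intro n
  induction n with
  | zero =>
    intro lo hi hn hlh hhl h3 h4
    have : hi = lo := by omega
    subst this
    exact ⟨le_refl _, le_refl _, h3, h4⟩
  | succ n ihn =>
    intro lo hi hn hlh hhl h3 h4
    have hunf : pvInsPos (n + 1) s x lo hi = (if lo < hi then
        if x < s.getD ((lo + hi) / 2) 0 then pvInsPos n s x lo ((lo + hi) / 2)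
        else pvInsPos n s x ((lo + hi) / 2 + 1) hi
      else lo) := rfl
    rw [hunf]
    by_cases hcond : lo < hi
    · rw [if_pos hcond]
      have hmid1 : lo ≤ (lo + hi) / 2 := by omega
      have hmid2 : (lo + hi) / 2 < hi := by omega
      have hmlen : (lo + hi) / 2 < s.length := by omega
      have hgd : s.getD ((lo + hi) / 2) 0 = s[(lo + hi) / 2] := List.getD_eq_getElem s 0 hmlen
      by_cases hlt : x < s.getD ((lo + hi) / 2) 0
      · rw [if_pos hlt]
        refine (ihn lo ((lo + hi) / 2) (by omega) (by omega) (by omega) h3 ?_).imp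
          (fun h => h) (fun h => ⟨h.1.trans (by omega), h.2⟩)
        intro idx hidx hlen2
        rcases Nat.lt_or_ge idx hi with hih | hih
        · calc x < s[(lo + hi) / 2] := by rw [hgd] at hlt; exact hlt
               _ ≤ s[idx] := pv_sorted_mono s hs _ _ hidx hlen2
        · exact h4 idx hih hlen2
      · rw [if_neg hlt]
        refine (ihn ((lo + hi) / 2 + 1) hi (by omega) (by omega) hhl ?_ h4).imp
          (fun h => le_trans (by omega) h) (fun h => h)
        intro idx hidx hlen2
        rcases Nat.lt_or_ge idx lo with hil | hil
        · exact h3 idx hil hlen2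
        · calc s[idx] ≤ s[(lo + hi) / 2] := pv_sorted_mono s hs _ _ (by omega) hmlen
               _ ≤ x := by rw [hgd] at hlt; omega
    · rw [if_neg hcond]
      have : hi = lo := by omega
      subst this
      exact ⟨le_refl _, le_refl _, h3, h4⟩

theorem pv_insert_sorted (s : List Int) (x : Int) (hs : s.Pairwise (· ≤ ·)) :
    (PySem.List.insert s ((pvInsPos s.length s x 0 s.length : Nat) : Int) x).Pairwise (· ≤ ·) ∧
    (PySem.List.insert s ((pvInsPos s.length s x 0 s.length : Nat) : Int) x).Perm (x :: s) := by
  obtain ⟨-, hple, h3, h4⟩ := pv_insPos_spec s x hs s.length 0 s.length (by omega) (by omega)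
    (le_refl _) (by omega) (by intro idx h1 h2; omega)
  set p := pvInsPos s.length s x 0 s.length with hp
  rw [PySem.List.insert_natCast s p x hple]
  constructor
  · rw [List.pairwise_append]
    refine ⟨hs.sublist (List.take_sublist p s), ?_, ?_⟩
    · rw [List.pairwise_cons]
      refine ⟨?_, hs.sublist (List.drop_sublist p s)⟩
      intro b hb
      obtain ⟨i, hi, hbi⟩ := List.mem_iff_getElem.mp hb
      rw [List.getElem_drop] at hbi
      subst hbi
      exact le_of_lt (h4 (p + i) (by omega) (by simp at hi; omega))
    · intro a ha b hb
      obtain ⟨i, hi, hai⟩ := List.mem_iff_getElem.mp ha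
      rw [List.getElem_take] at hai
      subst hai
      have hilen : i < s.length := by simp at hi; omega
      have hax : s[i] ≤ x := h3 i (by simp at hi; omega) hilen
      rcases List.mem_cons.mp hb with rfl | hb
      · exact hax
      · obtain ⟨j, hj, hbj⟩ := List.mem_iff_getElem.mp hb
        rw [List.getElem_drop] at hbj
        subst hbj
        exact hax.trans (le_of_lt (h4 (p + j) (by omega) (by simp at hj; omega)))
  · exact (List.perm_middle).trans (by rw [List.take_append_drop])

-- the two middle elements: drop j of take (j+2)
theorem pv_two_middle (s : List Int) (j : Nat) (h : j + 2 ≤ s.length) :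
    (s.take (j + 2)).drop j = [s[j]'(by omega), s[j + 1]'(by omega)] := by
  apply List.ext_getElem (by simp; omega)
  intro i hi1 hi2
  rw [List.getElem_drop, List.getElem_take]
  simp only [List.length_cons, List.length_nil] at hi2
  have hi01 : i = 0 ∨ i = 1 := by omega
  rcases hi01 with rfl | rfl <;> simp

theorem pv_step_eq (rv h s : List Int) (x : Int) (hperm : h.Perm s) (hsort : s.Pairwise (· ≤ ·)) :
    (pvStepA (rv, h) x).1 = (pvStepB (rv, s) x).1 ∧
    (pvStepA (rv, h) x).2.Perm (pvStepB (rv, s) x).2 ∧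
    (pvStepB (rv, s) x).2.Pairwise (· ≤ ·) := by
  obtain ⟨hs'sort, hs'perm⟩ := pv_insert_sorted s x hsort
  set s' := PySem.List.insert s ((pvInsPos s.length s x 0 s.length : Nat) : Int) x with hs'def
  have hhp : (pvHeappush h x).Perm s' :=
    ((pv_heappush_perm h x).trans (hperm.cons x)).trans hs'perm.symm
  have hsorted_eq : PySem.List.sorted (pvHeappush h x) (fun v => v) false = s' :=
    PySem.List.sorted_id_eq_of_perm_of_pairwise _ _ hhp.symm hs'sort
  have hlen : (pvHeappush h x).length = s'.length := hhp.length_eq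
  have hlen' : s'.length = s.length + 1 := by rw [hs'perm.length_eq]; simp
  have hpos : 0 < s'.length := by omega
  constructor
  · -- the appended medians agree
    simp only [pvStepA, pvStepB, pvNsmallest, hsorted_eq, hlen]
    congr 1
    by_cases hpar : s'.length % 2 = 1
    · rw [if_pos hpar, if_pos hpar]
      set m := s'.length / 2 with hm
      have hmlt : m < s'.length := by omega
      have htne : s'.take (m + 1) ≠ [] := by
        intro hcon
        have hlt2 := congrArg List.length hcon
        rw [List.length_take] at hlt2
        simp only [List.length_nil] at hlt2
        omega
      rw [PySem.List.pyGetD_neg_one _ _ htne, List.getLast_eq_getElem]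
      have hlt : (s'.take (m + 1)).length = m + 1 := by simp; omega
      rw [PySem.List.pyGetD_natCast, List.getD_eq_getElem s' 0 (by omega)]
      have : (s'.take (m + 1)).length - 1 = m := by omega
      simp only [this]
      rw [List.getElem_take]
    · rw [if_neg hpar, if_neg hpar]
      have h2le : 2 ≤ s'.length := by omega
      set m := s'.length / 2 with hm
      have hm1 : 1 ≤ m := by omega
      have hkeq : s'.length / 2 + 1 = (m - 1) + 2 := by omega
      have htl : (s'.take (s'.length / 2 + 1)).length = m + 1 := by simp; omega
      rw [PySem.List.slice_from_neg_ofNat _ 2 (by omega), htl]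
      have : m + 1 - 2 = m - 1 := by omega
      rw [this, hkeq, pv_two_middle s' (m - 1) (by omega)]
      have hidx : m - 1 + 1 = m := by omega
      congr 1
      · simp only [List.sum_cons, List.sum_nil, hidx]
        rw [PySem.List.pyGetD_natCast]
        have hc : ((m : Int) - 1) = ((m - 1 : Nat) : Int) := by
          rw [Nat.cast_sub hm1, Nat.cast_one]
        rw [hc, PySem.List.pyGetD_natCast]
        rw [List.getD_eq_getElem s' 0 (show m - 1 < s'.length by omega),
          List.getD_eq_getElem s' 0 (show m < s'.length by omega)]
        congr 1
        omega
  · -- states: permutation and sortedness carry over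
    constructor
    · simpa only [pvStepA, pvStepB] using hhp
    · simpa only [pvStepB] using hs'sort

theorem pv_fold_eq : ∀ (arr rv h s : List Int), h.Perm s → s.Pairwise (· ≤ ·) →
    (arr.foldl pvStepA (rv, h)).1 = (arr.foldl pvStepB (rv, s)).1 := by
  intro arr
  induction arr with
  | nil => intro rv h s _ _; rfl
  | cons x t ih =>
    intro rv h s hperm hsort
    have hstep := pv_step_eq rv h s x hperm hsort
    simp only [List.foldl_cons]
    have h1 : pvStepA (rv, h) x = ((pvStepA (rv, h) x).1, (pvStepA (rv, h) x).2) := rfl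
    have h2 : pvStepB (rv, s) x = ((pvStepB (rv, s) x).1, (pvStepB (rv, s) x).2) := rfl
    rw [h1, h2, hstep.1]
    exact ih (pvStepB (rv, s) x).1 _ _ hstep.2.1 hstep.2.2

-- ===== VERDICT (by name: the statement is the Claim_ definition above) =====
theorem median_of_stream_spec : Claim_equal_median_of_stream := by
  intro arr _
  unfold Spec_median_of_stream median_of_stream median_of_stream_alt
  exact pv_fold_eq arr [] [] [] (List.Perm.refl _) (by simp)
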